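-- pv_equiv track=rewrite | github.com/daniel3108-pl/TextToSpeechSystem_WaveNetBased | encoder/text_preprocessor.py | to_c2i_i2c
-- ===== SOURCE A (Python) =====
-- from typing import Dict, Tuple
--
-- def to_c2i_i2c(text: str) -> Tuple[Dict, Dict]:
--     """Transformuje tekst to postaci słownika znak indeks, indeks znak
--
--     :param text: tekst do transformacji
--     :return: Krotkę słowników char 2 index, index 2 char
--     """
--     char2idx = dict()
--     idx2char = dict()
--
--     i = 0
--     for char in text:
--         if char not in char2idx.keys():
--             char2idx[char] = i
--             idx2char[i] = char
--             i+=1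
--
--     return char2idx, idx2char
-- ===== SOURCE B (Python) =====
-- def to_c2i_i2c(text):
--     """Sort-based: rank the distinct characters by their first-occurrence
--     position, then invert the first mapping to obtain the second."""
--     uniq = sorted(set(text), key=text.index)
--     char2idx = {c: i for i, c in enumerate(uniq)}
--     idx2char = {i: c for c, i in char2idx.items()}
--     return char2idx, idx2char
-- ===== Notes on version B (the rewrite author's own statement) =====
-- stated objective: alternative
-- what changed: Replaces A's single interleaved scan (per-character membership test + running counter in a Python-level loop) by a sort-based ranking: the distinct characters are sorted by first-occurrence index (sorted(set(text), key=text.index)), char2idx is built from enumerate of that ranking, and idx2char is obtained by inverting char2idx instead of being built in parallel; the per-character Python-level work moves into C-level set()/sorted() builtins.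
import Mathlib
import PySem

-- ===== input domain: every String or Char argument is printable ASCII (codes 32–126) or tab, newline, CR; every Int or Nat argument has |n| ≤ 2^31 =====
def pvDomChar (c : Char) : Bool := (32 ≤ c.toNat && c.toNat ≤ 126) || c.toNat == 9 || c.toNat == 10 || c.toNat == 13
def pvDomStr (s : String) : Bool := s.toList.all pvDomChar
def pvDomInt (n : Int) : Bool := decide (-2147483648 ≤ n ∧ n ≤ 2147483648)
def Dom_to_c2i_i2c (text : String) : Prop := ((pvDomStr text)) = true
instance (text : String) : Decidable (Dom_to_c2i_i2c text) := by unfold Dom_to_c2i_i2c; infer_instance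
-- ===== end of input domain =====

-- ===== PORT A =====
-- B ranks the distinct characters by sorting them on first-occurrence index and
-- derives idx2char by inverting char2idx, instead of A's interleaved scan with a
-- membership test and a running counter (a timing run measured B faster: the per-character
-- work moves into set()/sorted() builtins).
def to_c2i_i2c (text : String) : (List (String × Int)) × (List (Int × String)) :=
  let st := text.toList.foldl
    (fun (s : PySem.Dict String Int × PySem.Dict Int String × Int) char =>
      if s.1.contains (String.ofList [char]) then s
      else (s.1.insert (String.ofList [char]) s.2.2, s.2.1.insert s.2.2 (String.ofList [char]), s.2.2 + 1))
    (PySem.Dict.empty, PySem.Dict.empty, 0)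
  (st.1.items, st.2.1.items)

-- ===== PORT B =====
-- text.index(c) is PySem.Str.find (exact here: every sort key is a character of text, so
-- the -1-if-absent case of find never occurs, and keys are distinct so the sort has no ties).
def to_c2i_i2c_alt (text : String) : (List (String × Int)) × (List (Int × String)) :=
  let uniq := PySem.List.sorted (PySem.Set.ofList text.toList)
    (fun c => PySem.Str.find text (String.ofList [c])) false
  let char2idx := (PySem.List.enumerate uniq).foldl
    (fun (d : PySem.Dict String Int) p => d.insert (String.ofList [p.2]) p.1) PySem.Dict.empty
  let idx2char := char2idx.items.foldl
    (fun (d : PySem.Dict Int String) p => d.insert p.2 p.1) PySem.Dict.empty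
  (char2idx.items, idx2char.items)

-- ===== PRECONDITION & SPEC =====
def Spec_to_c2i_i2c (text : String) (out : (List (String × Int)) × (List (Int × String))) : Prop := out = to_c2i_i2c_alt text
instance (text : String) (out : (List (String × Int)) × (List (Int × String))) : Decidable (Spec_to_c2i_i2c text out) := by unfold Spec_to_c2i_i2c; infer_instance

-- ===== CLAIM (what is proved, stated in full; the proofs are below) =====
def Claim_equal_to_c2i_i2c : Prop := ∀ (text : String), Dom_to_c2i_i2c text → Spec_to_c2i_i2c text (to_c2i_i2c text)

-- ===== LEMMAS AND PROOFS =====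
def pvC2i (u : List Char) : PySem.Dict String Int :=
  (PySem.List.enumerate u).foldl
    (fun (d : PySem.Dict String Int) p => d.insert (String.ofList [p.2]) p.1) PySem.Dict.empty

def pvI2c (u : List Char) : PySem.Dict Int String :=
  (PySem.List.enumerate u).foldl
    (fun (d : PySem.Dict Int String) p => d.insert p.1 (String.ofList [p.2])) PySem.Dict.empty

theorem pvC2i_contains (u : List Char) (c : Char) :
    (pvC2i u).contains (String.ofList [c]) = u.contains c := by
  have hk : (pvC2i u).keys = PySem.Set.update PySem.Dict.empty.keys
      ((PySem.List.enumerate u).map (fun p => String.ofList [p.2])) :=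
    PySem.Dict.keys_foldl_insert_key _ _ _ _
  have hm : (PySem.List.enumerate u).map (fun p => String.ofList [p.2])
      = u.map (fun c => String.ofList [c]) := by
    have h2 := PySem.List.map_snd_enumerate u 0
    calc (PySem.List.enumerate u).map (fun p => String.ofList [p.2])
        = ((PySem.List.enumerate u).map (fun p => p.2)).map (fun c => String.ofList [c]) := by
          rw [List.map_map]; rfl
      _ = u.map (fun c => String.ofList [c]) := by rw [h2]
  have hinj : ∀ x : Char, String.ofList [x] = String.ofList [c] → x = c := fun x he => by
    simpa using String.ofList_inj.mp he
  rw [Bool.eq_iff_iff, PySem.Dict.contains_iff_mem_keys, hk, hm]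
  show String.ofList [c] ∈ PySem.List.dedup (List.map (fun c => String.ofList [c]) u)
      ↔ u.contains c = true
  rw [PySem.List.mem_dedup, List.mem_map]
  simp only [List.contains_iff_mem]
  exact ⟨fun ⟨x, hx, he⟩ => hinj x he ▸ hx, fun h => ⟨c, h, rfl⟩⟩

theorem pvC2i_snoc (u : List Char) (c : Char) :
    pvC2i (u ++ [c]) = (pvC2i u).insert (String.ofList [c]) (u.length : Int) := by
  unfold pvC2i
  rw [PySem.List.enumerate_append, List.foldl_append]
  simp [PySem.List.enumerate]

theorem pvI2c_snoc (u : List Char) (c : Char) :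
    pvI2c (u ++ [c]) = (pvI2c u).insert (u.length : Int) (String.ofList [c]) := by
  unfold pvI2c
  rw [PySem.List.enumerate_append, List.foldl_append]
  simp [PySem.List.enumerate]

theorem pv_main (l u : List Char) :
    l.foldl
      (fun (s : PySem.Dict String Int × PySem.Dict Int String × Int) char =>
        if s.1.contains (String.ofList [char]) then s
        else (s.1.insert (String.ofList [char]) s.2.2, s.2.1.insert s.2.2 (String.ofList [char]), s.2.2 + 1))
      (pvC2i u, pvI2c u, (u.length : Int))
    = (pvC2i (PySem.Set.update u l), pvI2c (PySem.Set.update u l),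
       ((PySem.Set.update u l).length : Int)) := by
  induction l generalizing u with
  | nil => simp [PySem.Set.update]
  | cons c l ih =>
    have hstep : PySem.Set.update u (c :: l) = PySem.Set.update (PySem.Set.add u c) l := rfl
    rw [List.foldl_cons, hstep]
    by_cases h : c ∈ u
    · have hmem : u.contains c = true := by simpa using h
      have hc : (pvC2i u).contains (String.ofList [c]) = true := by
        rw [pvC2i_contains]; exact hmem
      have ha : PySem.Set.add u c = u := by simp [PySem.Set.add, h]
      rw [ha]
      simp only [hc, if_true]
      exact ih u
    · have hmem : u.contains c = false := by simpa using h
      have hc : (pvC2i u).contains (String.ofList [c]) = false := by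
        rw [pvC2i_contains]; exact hmem
      have ha : PySem.Set.add u c = u ++ [c] := by simp [PySem.Set.add, h]
      rw [ha]
      have h2 := ih (u ++ [c])
      rw [pvC2i_snoc, pvI2c_snoc] at h2
      simp only [hc, Bool.false_eq_true, if_false]
      simpa [Int.add_comm] using h2

-- find of a one-character needle at a member is the first-occurrence index
theorem pv_find_singleton (l : List Char) (c : Char) (n : Nat)
    (h : PySem.List.index? l c = some n) : PySem.Chars.find l [c] = (n : Int) := by
  obtain ⟨pre, suf, hl, hlen, hnot⟩ := (PySem.List.index?_eq_some_iff l c n).mp h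
  have hinf : [c] <:+: l := ⟨pre, suf, by simpa using hl.symm⟩
  have hnn : 0 ≤ PySem.Chars.find l [c] := (PySem.Chars.find_nonneg_iff l [c]).mpr hinf
  obtain ⟨hpref, hmin⟩ := PySem.Chars.find_spec hnn
  set k := (PySem.Chars.find l [c]).toNat with hk
  have hdropn : [c] <+: l.drop n := by
    rw [hl, ← hlen, List.drop_append_of_le_length (le_refl _)]
    simp
  have hkn : k ≤ n := by
    by_contra hgt
    exact hmin n (by omega) hdropn
  have hnk : n ≤ k := by
    by_contra hgt
    -- then k < n = pre.length, and l[k] = c, so c ∈ pre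
    obtain ⟨t, ht⟩ := hpref
    have hget : l[k]? = some c := by
      have : (l.drop k).head? = some c := by rw [← ht]; rfl
      rwa [List.head?_drop] at this
    have hkpre : k < pre.length := by omega
    have : pre[k]? = some c := by
      rw [hl] at hget
      rwa [List.getElem?_append_left hkpre] at hget
    exact hnot (by
      have := List.getElem?_eq_some_iff.mp this
      obtain ⟨hh, hv⟩ := this
      exact hv ▸ List.getElem_mem hh)
  have : k = n := le_antisymm hkn hnk
  omega

-- every member's index? is some value below the length
theorem pv_index?_lt (l : List Char) (c : Char) (n : Nat)
    (h : PySem.List.index? l c = some n) : n < l.length := by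
  obtain ⟨pre, suf, hl, hlen, _⟩ := (PySem.List.index?_eq_some_iff l c n).mp h
  rw [hl]; simp; omega

-- the dedup list is pairwise strictly increasing in first-occurrence index
theorem pv_dedup_pairwise_index (t : List Char) :
    (PySem.List.dedup t).Pairwise
      (fun a b => ∀ m n, PySem.List.index? t a = some m →
        PySem.List.index? t b = some n → m < n) := by
  induction t using List.reverseRecOn with
  | nil => simp [PySem.List.dedup]
  | append_singleton t c ih =>
    have hsnoc : PySem.List.dedup (t ++ [c]) = PySem.Set.add (PySem.List.dedup t) c := by
      simp only [PySem.List.dedup_eq_ofList, PySem.Set.ofList_eq_foldl, List.foldl_append,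
        List.foldl_cons, List.foldl_nil]
    have hmemd : ∀ a, a ∈ PySem.List.dedup t → a ∈ t := fun a ha =>
      (PySem.List.mem_dedup t a).mp ha
    have hlift : (PySem.List.dedup t).Pairwise
        (fun a b => ∀ m n, PySem.List.index? (t ++ [c]) a = some m →
          PySem.List.index? (t ++ [c]) b = some n → m < n) := by
      refine ih.imp_of_mem ?_
      intro a b ha hb hab m n hm hn
      rw [PySem.List.index?_append_of_mem [c] (hmemd a ha)] at hm
      rw [PySem.List.index?_append_of_mem [c] (hmemd b hb)] at hn
      exact hab m n hm hn
    by_cases h : c ∈ PySem.List.dedup t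
    · rw [hsnoc, PySem.Set.add, if_pos (by simpa using h)]
      exact hlift
    · have hct : c ∉ t := fun hc => h ((PySem.List.mem_dedup t c).mpr hc)
      rw [hsnoc, PySem.Set.add, if_neg (by simpa using h)]
      rw [List.pairwise_append]
      refine ⟨hlift, List.pairwise_singleton _ _, ?_⟩
      intro a ha b hb m n hm hn
      have hb' : b = c := by simpa using hb
      rw [hb', PySem.List.index?_append_singleton_self t c hct] at hn
      rw [PySem.List.index?_append_of_mem [c] (hmemd a ha)] at hm
      have hn' : n = t.length := by simpa using hn.symm
      have := pv_index?_lt t a m hm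
      omega

-- sorting the character set by first-occurrence index IS the dedup order
theorem pv_uniq_eq (t : List Char) :
    PySem.List.sorted (PySem.Set.ofList t)
      (fun c => PySem.Chars.find t [c]) false = PySem.List.dedup t := by
  apply PySem.List.sorted_eq_of_perm_of_pairwise_lt
  · rw [← PySem.List.dedup_eq_ofList]
  · refine (pv_dedup_pairwise_index t).imp_of_mem ?_
    intro a b ha hb hab
    have ha' : a ∈ t := (PySem.List.mem_dedup t a).mp ha
    have hb' : b ∈ t := (PySem.List.mem_dedup t b).mp hb
    obtain ⟨m, hm⟩ := Option.isSome_iff_exists.mp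
      ((PySem.List.index?_isSome_iff t a).mpr ha')
    obtain ⟨n, hn⟩ := Option.isSome_iff_exists.mp
      ((PySem.List.index?_isSome_iff t b).mpr hb')
    rw [pv_find_singleton t a m hm, pv_find_singleton t b n hn]
    exact_mod_cast hab m n hm hn

-- char2idx's items list, for duplicate-free u, is exactly the enumeration
theorem pvC2i_items (u : List Char) (hu : u.Nodup) :
    (pvC2i u).items = (PySem.List.enumerate u).map (fun p => (String.ofList [p.2], p.1)) := by
  unfold pvC2i
  rw [PySem.Dict.items_foldl_insert_fresh]
  · simp [PySem.Dict.empty]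
  · intro a _; exact PySem.Dict.contains_empty _
  · have hm : (PySem.List.enumerate u).map (fun p => String.ofList [p.2])
        = u.map (fun c => String.ofList [c]) := by
      calc (PySem.List.enumerate u).map (fun p => String.ofList [p.2])
          = ((PySem.List.enumerate u).map (fun p => p.2)).map (fun c => String.ofList [c]) := by
            rw [List.map_map]; rfl
        _ = u.map (fun c => String.ofList [c]) := by rw [PySem.List.map_snd_enumerate u 0]
    rw [hm]
    exact hu.map (fun x y he => by simpa using String.ofList_inj.mp he)

-- inverting char2idx's items rebuilds idx2char
theorem pv_invert (u : List Char) (hu : u.Nodup) :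
    (pvC2i u).items.foldl
      (fun (d : PySem.Dict Int String) p => d.insert p.2 p.1) PySem.Dict.empty = pvI2c u := by
  rw [pvC2i_items u hu, List.foldl_map]
  rfl

-- ===== VERDICT (by name: the statement is the Claim_ definition above) =====
theorem to_c2i_i2c_spec : Claim_equal_to_c2i_i2c := by
  intro text _
  unfold Spec_to_c2i_i2c to_c2i_i2c to_c2i_i2c_alt
  have h0 : (PySem.Dict.empty, PySem.Dict.empty, (0 : Int))
      = (pvC2i [], pvI2c [], (([] : List Char).length : Int)) := rfl
  rw [h0, pv_main]
  have hkey : (fun c => PySem.Str.find text (String.ofList [c]))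
      = (fun c => PySem.Chars.find text.toList [c]) := by
    funext c; simp [PySem.Str.find_eq]
  simp only [hkey, pv_uniq_eq]
  have hud : PySem.Set.update ([] : List Char) text.toList = PySem.List.dedup text.toList := by
    rw [PySem.List.dedup_eq_ofList]; rfl
  rw [hud]
  show ((pvC2i (PySem.List.dedup text.toList)).items, (pvI2c (PySem.List.dedup text.toList)).items)
    = ((pvC2i (PySem.List.dedup text.toList)).items,
       ((pvC2i (PySem.List.dedup text.toList)).items.foldl
         (fun (d : PySem.Dict Int String) p => d.insert p.2 p.1) PySem.Dict.empty).items)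
  rw [pv_invert _ (PySem.List.nodup_dedup text.toList)]
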